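-- pv_equiv track=rewrite | github.com/dictation-toolbox/Caster | caster/lib/pita/selector.py | _sequence_hits
-- ===== SOURCE A (Python) =====
-- def _sequence_hits(source_tokens, in_tokens):
--     # Input:
--     #       A B C D E F G H I
--     #   0 1 A B C X Y Z
--     # Sequence Hits:
--     #   A B C
--     #     B C
--     # Sequence Hit Score:
--     #   3 + 2 = 5
--     # TODO: possibly modify so that sequence hits don't need to be contiguous (as would be the case in abbreviations)
--     total_score = 0
--     for source_start in range(len(source_tokens)):
--         start_source_token = source_tokens[source_start]
--         for in_start in range(len(in_tokens)):
--             start_in_token = in_tokens[in_start]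
--             if start_source_token == start_in_token:
--                     # found a token match, begin checking to see if we have a sequence of them
--                     source_cursor = source_start
--                     in_cursor = in_start
--                     sequence_length = 0
--                     while source_cursor < len(source_tokens) and in_cursor < len(in_tokens):
--                         current_source_token = source_tokens[source_cursor]
--                         current_in_token = in_tokens[in_cursor]
--                         if current_in_token == current_source_token:
--                             sequence_length += 1
--                         else:
--                             break
--                         source_cursor += 1
--                         in_cursor += 1
--                     if sequence_length >= 2:
--                         total_score += sequence_length
--     return total_score
-- ===== SOURCE B (Python) =====
-- def _sequence_hits(source_tokens, in_tokens):
--     # DP filled backward: row[j] = length of common run starting at (i, j);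
--     # every run of length >= 2 (from every start pair) is added once.
--     n, m = len(source_tokens), len(in_tokens)
--     total = 0
--     next_row = [0] * (m + 1)
--     for i in range(n - 1, -1, -1):
--         s = source_tokens[i]
--         row = [next_row[j + 1] + 1 if s == in_tokens[j] else 0 for j in range(m)] + [0]
--         total += sum(v for v in row if v >= 2)
--         next_row = row
--     return total
-- ===== Notes on version B (the rewrite author's own statement) =====
-- stated objective: faster
-- what changed: Replaces the O(n*m*k) rescan of each common run from every start pair by a backward-filled DP table row[j] = run length from (i,j), summing entries >= 2, computed in one O(n*m) pass.
import Mathlib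
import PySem

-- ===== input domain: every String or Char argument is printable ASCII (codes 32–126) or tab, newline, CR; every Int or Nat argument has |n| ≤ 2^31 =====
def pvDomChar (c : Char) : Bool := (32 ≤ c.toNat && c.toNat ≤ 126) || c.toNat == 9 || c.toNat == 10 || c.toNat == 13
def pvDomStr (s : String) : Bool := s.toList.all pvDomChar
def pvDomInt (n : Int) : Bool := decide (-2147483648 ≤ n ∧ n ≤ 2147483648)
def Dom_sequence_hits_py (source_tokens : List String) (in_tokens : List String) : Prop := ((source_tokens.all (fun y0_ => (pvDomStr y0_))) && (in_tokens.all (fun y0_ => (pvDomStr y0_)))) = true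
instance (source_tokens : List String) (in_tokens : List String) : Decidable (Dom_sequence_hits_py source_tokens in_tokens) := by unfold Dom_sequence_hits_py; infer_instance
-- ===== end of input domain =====

-- B replaces A's rescan of each common run from every start pair by a backward-filled
-- DP table of run lengths (one O(n*m) pass); equivalence of the two is proved below.

-- ===== PORT A =====
-- A's inner `while` loop: cursors advance while tokens match, accumulating sequence_length.
def pvAWhile (src tin : List String) (sc ic : Nat) (len : Int) : Int :=
  if h : sc < src.length ∧ ic < tin.length then
    if src.getD sc "" = tin.getD ic "" then
      pvAWhile src tin (sc + 1) (ic + 1) (len + 1)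
    else len
  else len
termination_by src.length - sc
decreasing_by omega

def sequence_hits_py (source_tokens : List String) (in_tokens : List String) : Int :=
  (List.range source_tokens.length).foldl (fun total source_start =>
    let start_source_token := source_tokens.getD source_start ""
    (List.range in_tokens.length).foldl (fun total in_start =>
      let start_in_token := in_tokens.getD in_start ""
      if start_source_token = start_in_token then
        let sequence_length := pvAWhile source_tokens in_tokens source_start in_start 0
        if sequence_length ≥ 2 then total + sequence_length else total
      else total) total) 0

-- ===== PORT B =====
-- one DP row: row[j] = next_row[j+1] + 1 if tokens at (i, j) match else 0, plus the trailing 0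
def pvBRow (src tin : List String) (i : Nat) (nr : List Int) : List Int :=
  (List.range tin.length).map (fun j =>
    if src.getD i "" = tin.getD j "" then nr.getD (j + 1) 0 + 1 else 0) ++ [0]

def sequence_hits_py_alt (source_tokens : List String) (in_tokens : List String) : Int :=
  ((List.range source_tokens.length).foldl (fun (st : Int × List Int) k =>
      let i := source_tokens.length - 1 - k
      let row := pvBRow source_tokens in_tokens i st.2
      (st.1 + (row.filter (fun v => decide (2 ≤ v))).sum, row))
    (0, List.replicate (in_tokens.length + 1) 0)).1

-- ===== PRECONDITION & SPEC =====
def Spec_sequence_hits_py (source_tokens : List String) (in_tokens : List String) (out : Int) : Prop := out = sequence_hits_py_alt source_tokens in_tokens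
instance (source_tokens : List String) (in_tokens : List String) (out : Int) : Decidable (Spec_sequence_hits_py source_tokens in_tokens out) := by unfold Spec_sequence_hits_py; infer_instance

-- ===== CLAIM (what is proved, stated in full; the proofs are below) =====
def Claim_equal_sequence_hits_py : Prop := ∀ (source_tokens : List String) (in_tokens : List String), Dom_sequence_hits_py source_tokens in_tokens → Spec_sequence_hits_py source_tokens in_tokens (sequence_hits_py source_tokens in_tokens)

-- ===== LEMMAS AND PROOFS =====

-- length of the common run of the two suffixes
def pvRunLen : List String → List String → Int
  | a :: s, b :: t => if a = b then pvRunLen s t + 1 else 0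
  | _, _ => 0

@[simp] theorem pvRunLen_nil_left (t : List String) : pvRunLen [] t = 0 := by cases t <;> rfl
@[simp] theorem pvRunLen_nil_right (s : List String) : pvRunLen s [] = 0 := by cases s <;> rfl

def pvContrib (src tin : List String) (i j : Nat) : Int :=
  if pvRunLen (src.drop i) (tin.drop j) ≥ 2 then pvRunLen (src.drop i) (tin.drop j) else 0

theorem pvRunLen_drop (src tin : List String) (i j : Nat) (hi : i < src.length) (hj : j < tin.length) :
    pvRunLen (src.drop i) (tin.drop j)
      = if src.getD i "" = tin.getD j "" then pvRunLen (src.drop (i+1)) (tin.drop (j+1)) + 1 else 0 := by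
  rw [List.drop_eq_getElem_cons hi, List.drop_eq_getElem_cons hj]
  simp [pvRunLen, List.getD_eq_getElem?_getD, List.getElem?_eq_getElem hi, List.getElem?_eq_getElem hj]

theorem pvAWhile_eq (src tin : List String) (sc ic : Nat) (len : Int) :
    pvAWhile src tin sc ic len = len + pvRunLen (src.drop sc) (tin.drop ic) := by
  fun_induction pvAWhile src tin sc ic len with
  | case1 sc ic len h heq ih =>
    rw [ih, pvRunLen_drop src tin sc ic h.1 h.2, if_pos heq]; ring
  | case2 sc ic len h heq =>
    rw [pvRunLen_drop src tin sc ic h.1 h.2, if_neg heq]; ring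
  | case3 sc ic len h =>
    rcases Nat.lt_or_ge sc src.length with h1 | h1
    · have h2 : tin.length ≤ ic := by omega
      rw [List.drop_eq_nil_of_le h2]; simp
    · rw [List.drop_eq_nil_of_le h1]; simp

-- the DP row of run lengths starting at source index i
def pvRowList (src tin : List String) (i : Nat) : List Int :=
  (List.range tin.length).map (fun j => pvRunLen (src.drop i) (tin.drop j)) ++ [0]

theorem pvRowList_len (src tin : List String) :
    pvRowList src tin src.length = List.replicate (tin.length + 1) 0 := by
  have h0 : ∀ j, pvRunLen (src.drop src.length) (tin.drop j) = 0 := by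
    intro j; rw [List.drop_length]; simp
  simp only [pvRowList, h0, List.map_const', List.length_range]
  rw [List.replicate_succ']

theorem pvRowList_getD (src tin : List String) (i j : Nat) :
    (pvRowList src tin i).getD j 0 = pvRunLen (src.drop i) (tin.drop j) := by
  rcases Nat.lt_or_ge j tin.length with h | h
  · rw [pvRowList, List.getD_append _ _ _ _ (by simpa using h),
      PySem.List.getD_map_range _ _ _ _ h]
  · rw [List.drop_eq_nil_of_le h, pvRunLen_nil_right]
    rcases Nat.lt_or_ge j (tin.length + 1) with h2 | h2
    · have hj : j = tin.length := by omega
      subst hj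
      simp [pvRowList, List.getD_eq_getElem?_getD]
    · apply List.getD_eq_default
      simp [pvRowList]; omega

theorem pvBRow_eq (src tin : List String) (i : Nat) (hi : i < src.length) :
    pvBRow src tin i (pvRowList src tin (i+1)) = pvRowList src tin i := by
  have key : ∀ j ∈ List.range tin.length,
      (if src.getD i "" = tin.getD j "" then (pvRowList src tin (i+1)).getD (j+1) 0 + 1 else 0)
        = pvRunLen (src.drop i) (tin.drop j) := by
    intro j hj
    rw [pvRowList_getD, pvRunLen_drop src tin i j hi (List.mem_range.mp hj)]
  unfold pvBRow
  conv_rhs => rw [pvRowList]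
  exact congrArg (· ++ [0]) (List.map_congr_left key)

-- sum of the ≥2 entries of a row is the sum of the if-thresholded entries
theorem pvFilter_sum (l : List Int) :
    (l.filter (fun v => decide (2 ≤ v))).sum = (l.map (fun v => if v ≥ 2 then v else 0)).sum := by
  induction l with
  | nil => rfl
  | cons a l ih => by_cases h : 2 ≤ a <;> simp [h, ih]

theorem pvRowScore (src tin : List String) (i : Nat) :
    ((pvRowList src tin i).filter (fun v => decide (2 ≤ v))).sum
      = ((List.range tin.length).map (fun j => pvContrib src tin i j)).sum := by
  rw [pvFilter_sum, pvRowList, List.map_append, List.sum_append, List.map_map]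
  simp [pvContrib, Function.comp_def]

-- the inner loop of A sums the contributions of row i
theorem pvA_inner (src tin : List String) (i : Nat) (hi : i < src.length) (total : Int) :
    (List.range tin.length).foldl (fun total in_start =>
      let start_in_token := tin.getD in_start ""
      if src.getD i "" = start_in_token then
        let sequence_length := pvAWhile src tin i in_start 0
        if sequence_length ≥ 2 then total + sequence_length else total
      else total) total
    = total + ((List.range tin.length).map (fun j => pvContrib src tin i j)).sum := by
  rw [PySem.List.foldl_congr_mem (g := fun total j => total + pvContrib src tin i j)]
  · exact PySem.List.foldl_add _ _ _
  · intro acc j hj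
    have hjm : j < tin.length := List.mem_range.mp hj
    simp only [pvContrib, pvAWhile_eq, zero_add,
      pvRunLen_drop src tin i j hi hjm, List.getD_eq_getElem?_getD]
    by_cases h : src[i]?.getD "" = tin[j]?.getD "" <;> simp only [h, if_true, if_false] <;> split_ifs <;> omega

theorem pvA_eq_sum (src tin : List String) :
    sequence_hits_py src tin
      = ((List.range src.length).map (fun i =>
          ((List.range tin.length).map (fun j => pvContrib src tin i j)).sum)).sum := by
  unfold sequence_hits_py
  rw [PySem.List.foldl_congr_mem (g := fun total i =>
        total + ((List.range tin.length).map (fun j => pvContrib src tin i j)).sum)]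
  · simpa using PySem.List.foldl_add (List.range src.length)
      (fun i => ((List.range tin.length).map (fun j => pvContrib src tin i j)).sum) 0
  · intro acc i hi
    exact pvA_inner src tin i (List.mem_range.mp hi) acc

-- B's fold invariant
theorem pvB_invariant (src tin : List String) (k : Nat) (hk : k ≤ src.length) :
    (List.range k).foldl (fun (st : Int × List Int) k =>
      let i := src.length - 1 - k
      let row := pvBRow src tin i st.2
      (st.1 + (row.filter (fun v => decide (2 ≤ v))).sum, row))
      (0, List.replicate (tin.length + 1) 0)
    = (((List.range k).map (fun t =>
          ((pvRowList src tin (src.length - 1 - t)).filter (fun v => decide (2 ≤ v))).sum)).sum,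
       pvRowList src tin (src.length - k)) := by
  induction k with
  | zero => simp [pvRowList_len]
  | succ k ih =>
    have hk' : k ≤ src.length := by omega
    rw [List.range_succ, List.foldl_append, ih hk', List.foldl_cons, List.foldl_nil]
    dsimp only
    have hrow : src.length - k = (src.length - 1 - k) + 1 := by omega
    have h2 : src.length - (k + 1) = src.length - 1 - k := by omega
    rw [hrow, h2, pvBRow_eq src tin _ (by omega)]
    simp

theorem pvB_eq_sum (src tin : List String) :
    sequence_hits_py_alt src tin
      = ((List.range src.length).map (fun t =>
          ((List.range tin.length).map (fun j =>
            pvContrib src tin (src.length - 1 - t) j)).sum)).sum := by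
  unfold sequence_hits_py_alt
  rw [pvB_invariant src tin src.length (le_refl _)]
  simp only [pvRowScore]

-- reversing the order of the row sums
theorem pvSum_reflect (n : Nat) (f : Nat → Int) :
    ((List.range n).map (fun t => f (n - 1 - t))).sum = ((List.range n).map f).sum := by
  show ∑ t ∈ Finset.range n, f (n - 1 - t) = ∑ t ∈ Finset.range n, f t
  exact Finset.sum_range_reflect f n

-- ===== VERDICT (by name: the statement is the Claim_ definition above) =====
theorem sequence_hits_py_spec : Claim_equal_sequence_hits_py := by
  intro src tin _
  unfold Spec_sequence_hits_py
  rw [pvA_eq_sum, pvB_eq_sum]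
  exact (pvSum_reflect src.length
    (fun i => ((List.range tin.length).map (fun j => pvContrib src tin i j)).sum)).symm
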